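-- pv_equiv track=rewrite | github.com/harrider/aoc-2025 | _aoc-tasks/day-05/aoc-day-05.py | is_fresh
-- ===== SOURCE A (Python) =====
-- from typing import List, Tuple, Optional, Set
--
-- def is_fresh(ingredient_id: int, merged_ranges: List[Tuple[int, int]]) -> bool:
--     """Binary search to check if ingredient_id falls within any merged range."""
--     lo, hi = 0, len(merged_ranges) - 1
--
--     while lo <= hi:
--         mid = (lo + hi) // 2
--         start, end = merged_ranges[mid]
--
--         if start <= ingredient_id <= end:
--             return True
--         elif ingredient_id < start:
--             hi = mid - 1
--         else:
--             lo = mid + 1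
--
--     return False
-- ===== SOURCE B (Python) =====
-- def is_fresh(ingredient_id, merged_ranges):
--     """Recursive divide-and-conquer on the list itself: probe the same midpoint
--     ((len-1)//2 of the current sublist, identical to A's (lo+hi)//2) and recurse
--     on the prefix or suffix sublist."""
--     if not merged_ranges:
--         return False
--     mid = (len(merged_ranges) - 1) // 2
--     start, end = merged_ranges[mid]
--     if start <= ingredient_id <= end:
--         return True
--     if ingredient_id < start:
--         return is_fresh(ingredient_id, merged_ranges[:mid])
--     return is_fresh(ingredient_id, merged_ranges[mid + 1:])
-- ===== Notes on version B (the rewrite author's own statement) =====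
-- stated objective: alternative
-- what changed: The iterative lo/hi-index binary-search loop is replaced by a recursive divide-and-conquer on the list itself: probe the midpoint element and recurse on the prefix or suffix slice; the probed midpoint sequence is identical, so the result matches on every input, sorted or not.
import Mathlib
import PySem

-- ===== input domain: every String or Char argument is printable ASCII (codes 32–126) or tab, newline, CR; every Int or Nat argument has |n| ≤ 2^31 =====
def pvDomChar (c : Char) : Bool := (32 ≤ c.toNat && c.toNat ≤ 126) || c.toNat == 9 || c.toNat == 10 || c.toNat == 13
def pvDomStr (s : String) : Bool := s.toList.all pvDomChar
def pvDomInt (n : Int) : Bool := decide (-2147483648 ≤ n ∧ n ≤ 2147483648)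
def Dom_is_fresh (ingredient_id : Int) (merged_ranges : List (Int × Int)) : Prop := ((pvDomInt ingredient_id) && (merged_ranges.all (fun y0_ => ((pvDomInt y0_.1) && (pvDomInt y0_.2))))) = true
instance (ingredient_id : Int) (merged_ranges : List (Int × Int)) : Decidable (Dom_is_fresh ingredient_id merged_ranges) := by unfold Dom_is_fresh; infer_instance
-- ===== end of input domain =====

-- B replaces A's iterative lo/hi-index binary-search loop by a recursive divide-and-conquer
-- on the list itself (same midpoint probe sequence); objective: alternative decomposition.

-- ===== PORT A =====
-- the while loop of A, as recursion on the shrinking window size (hi - lo + 1)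
def isFreshLoop (ingredient_id : Int) (merged_ranges : List (Int × Int)) (lo hi : Int) : Bool :=
  if hle : lo ≤ hi then
    let mid := PySem.Int.floordiv (lo + hi) 2
    match PySem.List.pyGet? merged_ranges mid with
    | none => false   -- unreachable when the loop starts from [0, len-1]: mid is then always in range
    | some (s, e) =>
      if s ≤ ingredient_id ∧ ingredient_id ≤ e then true
      else if ingredient_id < s then isFreshLoop ingredient_id merged_ranges lo (mid - 1)
      else isFreshLoop ingredient_id merged_ranges (mid + 1) hi
  else false
termination_by (hi - lo + 1).toNat
decreasing_by
  · have := PySem.Int.floordiv_two_mid_bounds hle; omega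
  · have := PySem.Int.floordiv_two_mid_bounds hle; omega

def is_fresh (ingredient_id : Int) (merged_ranges : List (Int × Int)) : Bool :=
  isFreshLoop ingredient_id merged_ranges 0 (merged_ranges.length - 1)

-- ===== PORT B =====
-- recursion on the list: probe element (len-1)//2, recurse on prefix/suffix slice
def is_fresh_alt (ingredient_id : Int) (merged_ranges : List (Int × Int)) : Bool :=
  if h : merged_ranges.isEmpty then false
  else
    let mid := (merged_ranges.length - 1) / 2   -- (len-1)//2; len ≥ 1, so Nat division is exact here
    match merged_ranges[mid]? with
    | none => false   -- unreachable: mid < length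
    | some (s, e) =>
      if s ≤ ingredient_id ∧ ingredient_id ≤ e then true
      else if ingredient_id < s then is_fresh_alt ingredient_id (merged_ranges.take mid)
      else is_fresh_alt ingredient_id (merged_ranges.drop (mid + 1))
termination_by merged_ranges.length
decreasing_by
  all_goals
    simp only [List.length_take, List.length_drop]
    simp only [List.isEmpty_iff, ← List.length_eq_zero_iff] at h
    omega

-- ===== PRECONDITION & SPEC =====
def Spec_is_fresh (ingredient_id : Int) (merged_ranges : List (Int × Int)) (out : Bool) : Prop := out = is_fresh_alt ingredient_id merged_ranges
instance (ingredient_id : Int) (merged_ranges : List (Int × Int)) (out : Bool) : Decidable (Spec_is_fresh ingredient_id merged_ranges out) := by unfold Spec_is_fresh; infer_instance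

-- ===== CLAIM (what is proved, stated in full; the proofs are below) =====
def Claim_equal_is_fresh : Prop := ∀ (ingredient_id : Int) (merged_ranges : List (Int × Int)), Dom_is_fresh ingredient_id merged_ranges → Spec_is_fresh ingredient_id merged_ranges (is_fresh ingredient_id merged_ranges)

-- ===== LEMMAS AND PROOFS =====

-- the loop on window [lo, hi] computes B's answer on the corresponding sublist of xs
theorem isFreshLoop_eq_alt (ingredient_id : Int) (xs : List (Int × Int)) (lo hi : Int)
    (hlo : 0 ≤ lo) (hhi : hi < xs.length) :
    isFreshLoop ingredient_id xs lo hi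
      = is_fresh_alt ingredient_id ((xs.drop lo.toNat).take (hi - lo + 1).toNat) := by
  rw [isFreshLoop]
  by_cases hle : lo ≤ hi
  · rw [dif_pos hle]
    have hb := PySem.Int.floordiv_two_mid_bounds hle
    have hfd : PySem.Int.floordiv (lo + hi) 2 = (lo + hi) / 2 :=
      PySem.Int.floordiv_eq_ediv_of_pos (by omega)
    set mid : Int := PySem.Int.floordiv (lo + hi) 2 with hmid
    set N : Nat := (hi - lo + 1).toNat with hN
    set w : List (Int × Int) := (xs.drop lo.toNat).take N with hw
    have hlen : w.length = N := by
      simp only [hw, List.length_take, List.length_drop]; omega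
    have hwne : ¬ (w.isEmpty = true) := by
      rw [List.isEmpty_iff, ← List.length_eq_zero_iff, hlen]; omega
    set midw : Nat := (w.length - 1) / 2 with hmidw
    have hmids : (lo.toNat : Int) + midw = mid := by
      rw [hmidw, hlen, hN, hfd]; omega
    have hmidwN : midw < N := by rw [hmidw, hlen, hN]; omega
    -- both sides probe the same element
    have hget : PySem.List.pyGet? xs mid = w[midw]? := by
      have h1 : w[midw]? = xs[lo.toNat + midw]? := by
        rw [hw, List.getElem?_take_of_lt hmidwN, List.getElem?_drop]
      have h3 : lo.toNat + midw = mid.toNat := by omega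
      have hmge : (0:Int) ≤ mid := by omega
      rw [h1, PySem.List.pyGet?_of_nonneg xs hmge, ← h3]
    conv_rhs => rw [is_fresh_alt]
    rw [dif_neg hwne]
    dsimp only
    rw [← hmidw, ← hget]
    cases hg : PySem.List.pyGet? xs mid with
    | none =>
      exfalso
      have hmge : (0:Int) ≤ mid := by omega
      rw [PySem.List.pyGet?_of_nonneg xs hmge, List.getElem?_eq_none_iff] at hg
      omega
    | some p =>
      obtain ⟨s, e⟩ := p
      dsimp only
      by_cases h1 : s ≤ ingredient_id ∧ ingredient_id ≤ e
      · rw [if_pos h1, if_pos h1]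
      · rw [if_neg h1, if_neg h1]
        by_cases h2 : ingredient_id < s
        · rw [if_pos h2, if_pos h2]
          have ih := isFreshLoop_eq_alt ingredient_id xs lo (mid - 1) hlo (by omega)
          have hpre : List.take midw w
              = List.take (mid - 1 - lo + 1).toNat (List.drop lo.toNat xs) := by
            rw [hw, List.take_take]
            congr 1
            omega
          rw [ih, hpre]
        · rw [if_neg h2, if_neg h2]
          have ih := isFreshLoop_eq_alt ingredient_id xs (mid + 1) hi (by omega) hhi
          have hsuf : List.drop (midw + 1) w
              = List.take (hi - (mid + 1) + 1).toNat (List.drop (mid + 1).toNat xs) := by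
            rw [hw, List.drop_take, List.drop_drop]
            congr 1
            · omega
            · congr 1
              omega
          rw [ih, hsuf]
  · rw [dif_neg hle]
    have h0 : (hi - lo + 1).toNat = 0 := by omega
    rw [h0, List.take_zero, is_fresh_alt]
    simp
termination_by (hi - lo + 1).toNat
decreasing_by
  · omega
  · omega

-- ===== VERDICT (by name: the statement is the Claim_ definition above) =====
theorem is_fresh_spec : Claim_equal_is_fresh := by
  intro id xs _
  unfold Spec_is_fresh is_fresh
  have h := isFreshLoop_eq_alt id xs 0 (xs.length - 1) le_rfl (by omega)
  simpa using h
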